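-- pv_equiv track=rewrite | github.com/Dsaipavan/codemind-python | Nearest_Prime.py | check
-- ===== SOURCE A (Python) =====
-- def prime(x):
--     c=0
--     for i in range(2,x):
--         if x%i==0:
--             c+=1
--     if c==0:
--         return (True)
--     else:
--         return (False)
--
-- def check(x):
--     a=x
--     b=x
--     while(prime(a)==False):
--         a=a-1
--     while(prime(b)==False):
--         b=b+1
--     if (abs(x-a)>abs(x-b)):
--         return b
--     else :
--         return a
-- ===== SOURCE B (Python) =====
-- def _is_prime(n):
--     # matches A's prime(): every n < 4 counts as "prime" (range(2, n) is empty or {2,3})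
--     if n < 4:
--         return True
--     d = 2
--     while d * d <= n:
--         if n % d == 0:
--             return False
--         d += 1
--     return True
--
-- def check(x):
--     k = 0
--     while True:
--         if _is_prime(x - k):
--             return x - k
--         if _is_prime(x + k):
--             return x + k
--         k += 1
-- ===== Notes on version B (the rewrite author's own statement) =====
-- stated objective: faster
-- what changed: B replaces A's O(n) count-all-divisors primality test with trial division up to sqrt(n) (keeping A's treatment of n<4 as prime), and replaces the two separate down/up while-loops with a single expanding-offset scan that checks x-k before x+k (same tie-breaking toward the lower value).
import Mathlib
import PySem

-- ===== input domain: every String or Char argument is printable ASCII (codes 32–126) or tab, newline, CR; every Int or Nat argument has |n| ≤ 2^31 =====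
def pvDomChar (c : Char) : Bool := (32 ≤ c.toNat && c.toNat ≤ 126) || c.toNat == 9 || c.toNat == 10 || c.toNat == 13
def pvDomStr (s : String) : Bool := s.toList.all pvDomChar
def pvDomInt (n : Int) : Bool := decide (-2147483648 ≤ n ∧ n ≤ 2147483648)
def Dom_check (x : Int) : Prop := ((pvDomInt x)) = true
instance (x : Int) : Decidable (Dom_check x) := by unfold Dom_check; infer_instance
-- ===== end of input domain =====

-- B replaces A's O(n) divisor-count primality test by trial division up to √n (keeping A's
-- treatment of n < 4 as prime) and the two down/up while-loops by one expanding-offset scan;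
-- a timing run reports whether this is measurably faster.

-- ===== PORT A =====
-- prime(x): count divisors i in range(2, x); "prime" iff the count is 0.
def primeA (x : Int) : Bool :=
  let c : Int := (PySem.List.pyRange 2 x 1).foldl
    (fun c i => if PySem.Int.mod x i = 0 then c + 1 else c) 0
  if c = 0 then true else false

-- lemmas cited by the ports' termination proofs (the loops of A and B must terminate)
theorem primeA_true_iff (x : Int) :
    primeA x = true ↔ ∀ i : Int, 2 ≤ i → i < x → PySem.Int.mod x i ≠ 0 := by
  unfold primeA
  rw [PySem.List.foldl_ite_add_one]
  simp [List.countP_eq_zero, PySem.List.mem_pyRange_one]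

theorem primeA_of_le_two {x : Int} (h : x ≤ 2) : primeA x = true :=
  (primeA_true_iff x).mpr (fun i h1 h2 => absurd (h1.trans_lt h2) (by omega))

theorem primeA_false_not_prime {b : Int} (h : primeA b = false) :
    3 ≤ b ∧ ¬ b.toNat.Prime := by
  have hx : ¬ (∀ i : Int, 2 ≤ i → i < b → PySem.Int.mod b i ≠ 0) := by
    intro hall
    rw [← primeA_true_iff] at hall
    rw [hall] at h; cases h
  push_neg at hx
  obtain ⟨i, h2i, hib, hmod⟩ := hx
  have hb3 : 3 ≤ b := by omega
  have hdvd : i ∣ b := (PySem.Int.mod_eq_zero_iff_dvd b i).mp hmod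
  refine ⟨hb3, fun hp => ?_⟩
  have hdn : i.toNat ∣ b.toNat := by
    have h1 : (i.toNat : Int) ∣ (b.toNat : Int) := by
      rw [Int.toNat_of_nonneg (by omega : (0:Int) ≤ i),
          Int.toNat_of_nonneg (by omega : (0:Int) ≤ b)]
      exact hdvd
    exact_mod_cast h1
  rcases hp.eq_one_or_self_of_dvd _ hdn with h1 | h1 <;> omega

-- distance from b up to the least prime ≥ b (termination measure for A's upward loop)
def upMeasure (b : Int) : Nat :=
  Nat.find (Nat.exists_infinite_primes b.toNat) - b.toNat

theorem upA_dec {b : Int} (h : primeA b = false) : upMeasure (b + 1) < upMeasure b := by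
  obtain ⟨hb3, hnp⟩ := primeA_false_not_prime h
  have hspec := Nat.find_spec (Nat.exists_infinite_primes b.toNat)
  have hPn : b.toNat < Nat.find (Nat.exists_infinite_primes b.toNat) :=
    lt_of_le_of_ne hspec.1 (fun e => hnp (e ▸ hspec.2))
  have h2 : (b + 1).toNat = b.toNat + 1 := by omega
  have hle : Nat.find (Nat.exists_infinite_primes (b + 1).toNat) ≤
      Nat.find (Nat.exists_infinite_primes b.toNat) :=
    Nat.find_min' _ ⟨by omega, hspec.2⟩
  have hge := (Nat.find_spec (Nat.exists_infinite_primes (b + 1).toNat)).1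
  unfold upMeasure
  omega

-- a = x; while prime(a) == False: a = a - 1
def downA (a : Int) : Int :=
  if primeA a = true then a else downA (a - 1)
termination_by (a - 2).toNat
decreasing_by
  rename_i h
  have h2 : ¬ a ≤ 2 := fun hle => h (primeA_of_le_two hle)
  omega

-- b = x; while prime(b) == False: b = b + 1
def upA (b : Int) : Int :=
  if primeA b = true then b else upA (b + 1)
termination_by upMeasure b
decreasing_by
  rename_i h
  exact upA_dec (by simpa using h)

def check (x : Int) : Int :=
  let a := downA x
  let b := upA x
  if |x - a| > |x - b| then b else a

-- ===== PORT B =====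
theorem primeB_loop_dec {n d : Int} (h1 : d * d ≤ n) (h2 : PySem.Int.mod n d ≠ 0) :
    (n - (d + 1)).toNat < (n - d).toNat := by
  have hd : d ≤ d * d := by nlinarith [sq_nonneg d, sq_nonneg (d - 1)]
  have hdn : d ≤ n := le_trans hd h1
  have hne : d ≠ n := by
    intro he
    subst he
    have h0 : 0 ≤ d := by nlinarith
    have h1' : d ≤ 1 := by nlinarith
    interval_cases d
    · exact h2 (by decide)
    · exact h2 (by decide)
  omega

-- d = 2; while d*d <= n: if n % d == 0: return False; d += 1; return True
def primeB_loop (n d : Int) : Bool :=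
  if d * d ≤ n then
    if PySem.Int.mod n d = 0 then false
    else primeB_loop n (d + 1)
  else true
termination_by (n - d).toNat
decreasing_by
  exact primeB_loop_dec ‹_› ‹_›

-- is_prime(n): every n < 4 counts as prime (matching A's prime())
def primeB (n : Int) : Bool :=
  if n < 4 then true else primeB_loop n 2

theorem primeB_false_ge {m : Int} (h : primeB m = false) : 4 ≤ m := by
  unfold primeB at h
  split at h
  · cases h
  · omega

-- k = 0; while True: try x-k, then x+k, else k += 1
def altLoop (x k : Int) : Int :=
  if primeB (x - k) = true then x - k
  else if primeB (x + k) = true then x + k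
  else altLoop x (k + 1)
termination_by (x - 2 - k).toNat
decreasing_by
  rename_i h1 _
  have h3 : 4 ≤ x - k := primeB_false_ge (by simpa using h1)
  omega

def check_alt (x : Int) : Int := altLoop x 0

-- ===== PRECONDITION & SPEC =====
def Spec_check (x : Int) (out : Int) : Prop := out = check_alt x
instance (x : Int) (out : Int) : Decidable (Spec_check x out) := by unfold Spec_check; infer_instance

-- ===== CLAIM (what is proved, stated in full; the proofs are below) =====
def Claim_equal_check : Prop := ∀ (x : Int), Dom_check x → Spec_check x (check x)

-- ===== LEMMAS AND PROOFS =====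

theorem downA_spec : ∀ (N : Nat) (a : Int), (a - 2).toNat ≤ N →
    downA a ≤ a ∧ primeA (downA a) = true ∧
      ∀ m, downA a < m → m ≤ a → primeA m = false := by
  intro N
  induction N with
  | zero =>
    intro a hN
    rw [downA]
    split
    · exact ⟨le_rfl, by assumption, fun m h1 h2 => absurd (h1.trans_le h2) (lt_irrefl a)⟩
    · rename_i h
      exact absurd (primeA_of_le_two (by omega)) h
  | succ N ih =>
    intro a hN
    rw [downA]
    split
    · exact ⟨le_rfl, by assumption, fun m h1 h2 => absurd (h1.trans_le h2) (lt_irrefl a)⟩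
    · rename_i h
      have ha2 : 2 < a := by
        by_contra hc
        exact h (primeA_of_le_two (by omega))
      obtain ⟨ih1, ih2, ih3⟩ := ih (a - 1) (by omega)
      refine ⟨by omega, ih2, fun m h1 h2 => ?_⟩
      rcases eq_or_lt_of_le h2 with rfl | hlt
      · simpa using h
      · exact ih3 m h1 (by omega)

theorem upA_spec : ∀ (N : Nat) (b : Int), upMeasure b ≤ N →
    b ≤ upA b ∧ primeA (upA b) = true ∧
      ∀ m, b ≤ m → m < upA b → primeA m = false := by
  intro N
  induction N with
  | zero =>
    intro b hN
    rw [upA]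
    split
    · exact ⟨le_rfl, by assumption, fun m h1 h2 => absurd (h1.trans_lt h2) (lt_irrefl b)⟩
    · rename_i h
      have := upA_dec (b := b) (by simpa using h)
      omega
  | succ N ih =>
    intro b hN
    rw [upA]
    split
    · exact ⟨le_rfl, by assumption, fun m h1 h2 => absurd (h1.trans_lt h2) (lt_irrefl b)⟩
    · rename_i h
      have hdec := upA_dec (b := b) (by simpa using h)
      obtain ⟨ih1, ih2, ih3⟩ := ih (b + 1) (by omega)
      refine ⟨by omega, ih2, fun m h1 h2 => ?_⟩
      rcases eq_or_lt_of_le h1 with rfl | hlt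
      · simpa using h
      · exact ih3 m (by omega) h2

theorem primeB_loop_iff : ∀ (N : Nat) (n d : Int), (n - d).toNat ≤ N → 0 ≤ d →
    (primeB_loop n d = true ↔
      ∀ e : Int, d ≤ e → e * e ≤ n → PySem.Int.mod n e ≠ 0) := by
  intro N
  induction N with
  | zero =>
    intro n d hN hd
    rw [primeB_loop]
    split
    · rename_i hdd
      split
      · rename_i hm
        simp only [Bool.false_eq_true, false_iff]
        push_neg
        exact ⟨d, le_rfl, hdd, hm⟩
      · rename_i hm
        have := primeB_loop_dec hdd hm
        omega
    · rename_i hdd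
      simp only [true_iff]
      intro e he1 he2
      have : d * d ≤ e * e := mul_self_le_mul_self hd he1
      exact absurd (le_trans this he2) hdd
  | succ N ih =>
    intro n d hN hd
    rw [primeB_loop]
    split
    · rename_i hdd
      split
      · rename_i hm
        simp only [Bool.false_eq_true, false_iff]
        push_neg
        exact ⟨d, le_rfl, hdd, hm⟩
      · rename_i hm
        have hdec := primeB_loop_dec hdd hm
        rw [ih n (d + 1) (by omega) (by omega)]
        constructor
        · intro h e he1 he2
          rcases eq_or_lt_of_le he1 with rfl | hlt
          · exact hm
          · exact h e (by omega) he2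
        · intro h e he1 he2
          exact h e (by omega) he2
    · rename_i hdd
      simp only [true_iff]
      intro e he1 he2
      have : d * d ≤ e * e := mul_self_le_mul_self hd he1
      exact absurd (le_trans this he2) hdd

theorem primeB_eq_primeA (n : Int) : primeB n = primeA n := by
  by_cases h4 : n < 4
  · unfold primeB
    rw [if_pos h4]
    by_cases h2 : n ≤ 2
    · exact (primeA_of_le_two h2).symm
    · have h3 : n = 3 := by omega
      subst h3
      decide
  · push_neg at h4
    unfold primeB
    rw [if_neg (by omega)]
    rw [Bool.eq_iff_iff]
    rw [primeB_loop_iff (n - 2).toNat n 2 le_rfl (by norm_num), primeA_true_iff]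
    constructor
    · intro hsq i h2i hin
      intro hmod
      have hdvd : i ∣ n := (PySem.Int.mod_eq_zero_iff_dvd n i).mp hmod
      obtain ⟨j, hj⟩ := hdvd
      have hj0 : 0 < j := by nlinarith
      have hj1 : j ≠ 1 := by intro he; rw [he, mul_one] at hj; omega
      have hj2 : 2 ≤ j := by omega
      by_cases hcmp : i ≤ j
      · exact hsq i h2i (by nlinarith) hmod
      · refine hsq j hj2 (by nlinarith) ?_
        exact (PySem.Int.mod_eq_zero_iff_dvd n j).mpr ⟨i, by linarith [hj, mul_comm i j]⟩
    · intro hall e h2e hee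
      have he_lt : e < n := by nlinarith
      exact hall e h2e he_lt

theorem altLoop_main (x : Int) : ∀ (N : Nat) (k : Int),
    (x - downA x - k).toNat ≤ N → 0 ≤ k → k ≤ x - downA x → k ≤ upA x - x →
    altLoop x k = (if x - downA x > upA x - x then upA x else downA x) := by
  obtain ⟨hal, hap, hamax⟩ := downA_spec (x - 2).toNat x le_rfl
  obtain ⟨hbl, hbp, hbmin⟩ := upA_spec (upMeasure x) x le_rfl
  intro N
  induction N with
  | zero =>
    intro k hN hk0 hka hkb
    rw [altLoop]
    have hxa : x - k = downA x := by omega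
    rw [if_pos (by rw [primeB_eq_primeA, hxa]; exact hap)]
    rw [if_neg (by omega)]
    exact hxa
  | succ N ih =>
    intro k hN hk0 hka hkb
    rw [altLoop]
    split
    · rename_i h1
      rw [primeB_eq_primeA] at h1
      have hxa : x - k = downA x := by
        by_contra hne
        have : downA x < x - k := by omega
        rw [hamax (x - k) this (by omega)] at h1
        cases h1
      rw [if_neg (by omega)]
      exact hxa
    · rename_i h1
      rw [primeB_eq_primeA] at h1
      have h1' : primeA (x - k) = false := by simpa using h1
      have hka' : k < x - downA x := by
        rcases eq_or_lt_of_le hka with rfl | h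
        · rw [show x - (x - downA x) = downA x by omega, hap] at h1'
          cases h1'
        · exact h
      split
      · rename_i h2
        rw [primeB_eq_primeA] at h2
        have hxb : x + k = upA x := by
          by_contra hne
          have : x + k < upA x := by omega
          rw [hbmin (x + k) (by omega) this] at h2
          cases h2
        rw [if_pos (by omega)]
        exact hxb
      · rename_i h2
        rw [primeB_eq_primeA] at h2
        have h2' : primeA (x + k) = false := by simpa using h2
        have hkb' : k < upA x - x := by
          rcases eq_or_lt_of_le hkb with rfl | h
          · rw [show x + (upA x - x) = upA x by omega, hbp] at h2'
            cases h2'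
          · exact h
        exact ih (k + 1) (by omega) (by omega) (by omega) (by omega)

-- ===== VERDICT (by name: the statement is the Claim_ definition above) =====
theorem check_spec : Claim_equal_check := by
  unfold Claim_equal_check
  intro x _
  unfold Spec_check check check_alt
  obtain ⟨hal, hap, hamax⟩ := downA_spec (x - 2).toNat x le_rfl
  obtain ⟨hbl, hbp, hbmin⟩ := upA_spec (upMeasure x) x le_rfl
  show (if |x - downA x| > |x - upA x| then upA x else downA x) = altLoop x 0
  rw [altLoop_main x (x - downA x - 0).toNat 0 le_rfl le_rfl (by omega) (by omega)]
  rw [show |x - downA x| = x - downA x from abs_of_nonneg (by omega),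
      show |x - upA x| = upA x - x from by rw [abs_of_nonpos (by omega)]; ring]
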